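-- pv_equiv track=rewrite | github.com/Jie77/python | hehe/assignment7_3.py | printOdd
-- ===== SOURCE A (Python) =====
-- def printOdd(a, b):
--     arr = []
--     if b%2 == 1:
--         for i in range(b, a-1, -2):
--             arr.append(i)
--     else:
--         for i in range(b-1, a-1, -2):
--             arr.append(i)
--     return arr
-- ===== SOURCE B (Python) =====
-- def printOdd(a, b):
--     return [i for i in range(b, a - 1, -1) if i % 2 == 1]
-- ===== Notes on version B (the rewrite author's own statement) =====
-- stated objective: simpler
-- what changed: Replaces A's parity branch with step-by-2 descending ranges by a single filtered comprehension over the full descending range, scanning every integer and keeping the odd ones.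
import Mathlib
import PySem

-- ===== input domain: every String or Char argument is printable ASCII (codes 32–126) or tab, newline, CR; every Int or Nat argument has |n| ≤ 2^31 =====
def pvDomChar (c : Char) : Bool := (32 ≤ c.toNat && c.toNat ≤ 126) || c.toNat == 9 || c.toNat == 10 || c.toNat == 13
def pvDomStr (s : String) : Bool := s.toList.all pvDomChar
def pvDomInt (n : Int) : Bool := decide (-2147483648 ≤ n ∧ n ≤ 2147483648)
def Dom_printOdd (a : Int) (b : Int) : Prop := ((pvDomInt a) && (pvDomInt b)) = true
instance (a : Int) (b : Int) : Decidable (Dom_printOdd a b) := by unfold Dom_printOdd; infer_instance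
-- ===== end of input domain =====

-- ===== PORT A =====
-- A: branch on parity of b, then walk a step-(-2) range appending each element.
def printOdd (a : Int) (b : Int) : List Int :=
  let arr : List Int := []
  if PySem.Int.mod b 2 == 1 then
    (PySem.List.pyRange b (a - 1) (-2)).foldl (fun arr i => arr ++ [i]) arr
  else
    (PySem.List.pyRange (b - 1) (a - 1) (-2)).foldl (fun arr i => arr ++ [i]) arr

-- ===== PORT B =====
-- B: scan the full descending range once and filter by oddness (no parity branch).
def printOdd_alt (a : Int) (b : Int) : List Int :=
  (PySem.List.pyRange b (a - 1) (-1)).filter (fun i => PySem.Int.mod i 2 == 1)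

-- ===== PRECONDITION & SPEC =====
def Spec_printOdd (a : Int) (b : Int) (out : List Int) : Prop := out = printOdd_alt a b
instance (a : Int) (b : Int) (out : List Int) : Decidable (Spec_printOdd a b out) := by unfold Spec_printOdd; infer_instance

-- ===== CLAIM (what is proved, stated in full; the proofs are below) =====
def Claim_equal_printOdd : Prop := ∀ (a : Int) (b : Int), Dom_printOdd a b → Spec_printOdd a b (printOdd a b)

-- ===== LEMMAS AND PROOFS =====

-- range(a, b, -2) is empty when a ≤ b
lemma pyRange_neg_two_eq_nil {a b : Int} (h : a ≤ b) :
    PySem.List.pyRange a b (-2) = [] := by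
  simp [PySem.List.pyRange]
  omega

-- range(a, b, -2) peels its first element when b < a
lemma pyRange_neg_two_cons {a b : Int} (h : b < a) :
    PySem.List.pyRange a b (-2) = a :: PySem.List.pyRange (a - 2) b (-2) := by
  simp only [PySem.List.pyRange]
  norm_num
  by_cases h2 : b < a - 2
  · have hc : ((a - b + 2 - 1) / 2).toNat = ((a - 2 - b + 2 - 1) / 2).toNat + 1 := by omega
    simp [h, h2, hc, List.range_succ_eq_map, List.map_map]
    intro k _
    ring
  · have hc : ((a - b + 2 - 1) / 2).toNat = 1 := by omega
    simp [h, h2, hc, List.range_succ_eq_map]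

-- main invariant: filtering the step-(-1) range for odd i gives A's step-(-2) range
lemma filter_odd_eq (n : Nat) : ∀ (a b : Int), (b - a + 1).toNat = n →
    (PySem.List.pyRange b (a - 1) (-1)).filter (fun i => PySem.Int.mod i 2 == 1) =
      if PySem.Int.mod b 2 == 1 then PySem.List.pyRange b (a - 1) (-2)
      else PySem.List.pyRange (b - 1) (a - 1) (-2) := by
  induction n with
  | zero =>
    intro a b hn
    have hba : b ≤ a - 1 := by omega
    rw [PySem.List.pyRange_neg_one_eq_nil hba, pyRange_neg_two_eq_nil hba,
        pyRange_neg_two_eq_nil (by omega : b - 1 ≤ a - 1)]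
    simp
  | succ n ih =>
    intro a b hn
    have hab : a - 1 < b := by omega
    have hmod : PySem.Int.mod b 2 = b % 2 := PySem.Int.mod_eq_emod_of_pos (by norm_num)
    have hmod1 : PySem.Int.mod (b - 1) 2 = (b - 1) % 2 := PySem.Int.mod_eq_emod_of_pos (by norm_num)
    have ihb := ih a (b - 1) (by omega)
    rw [PySem.List.pyRange_neg_one_cons hab, List.filter_cons]
    rcases Int.emod_two_eq b with hb | hb
    · -- b even: b is dropped, b-1 is odd
      have hpred : (PySem.Int.mod b 2 == 1) = false := by simp [hb]
      have hpred1 : (PySem.Int.mod (b - 1) 2 == 1) = true := by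
        simp only [hmod1]; simp; omega
      rw [hpred]
      simp only [Bool.false_eq_true, if_false]
      rw [ihb, hpred1]
      simp
    · -- b odd: b is kept, b-1 is even
      have hpred : (PySem.Int.mod b 2 == 1) = true := by simp [hb]
      have hpred1 : (PySem.Int.mod (b - 1) 2 == 1) = false := by
        simp only [hmod1]; simp; omega
      rw [hpred]
      simp only [if_true]
      rw [ihb, hpred1]
      simp only [Bool.false_eq_true, if_false]
      rw [pyRange_neg_two_cons hab]
      have hbb : b - 1 - 1 = b - 2 := by ring
      rw [hbb]

-- ===== VERDICT (by name: the statement is the Claim_ definition above) =====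
theorem printOdd_spec : Claim_equal_printOdd := by
  intro a b _
  unfold Spec_printOdd printOdd printOdd_alt
  rw [filter_odd_eq (b - a + 1).toNat a b rfl]
  rcases Bool.eq_false_or_eq_true (PySem.Int.mod b 2 == 1) with h | h <;>
    simp only [h, if_true, Bool.false_eq_true, if_false,
      PySem.List.foldl_append_singleton, List.nil_append]
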